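-- pv_equiv track=rewrite | github.com/yokolet/tranquil-beach-python | tranquil-beach/sorting_searching/form_string.py | shortestWay2
-- ===== SOURCE A (Python) =====
-- from collections import defaultdict
--
-- def shortestWay2(source: str, target: str) -> int:
--     m, n = len(source), len(target)
--     c2i = defaultdict(list)
--     for i in range(len(source)):
--         c2i[source[i]].append(i)
--
--     if target[0] not in c2i: return -1
--     idx = c2i[target[0]][0]
--     queue, result = [([[idx]], 1)], []
--     while queue:
--         seqs, t_idx = queue.pop(0)
--         if t_idx >= n:
--             result.append(len(seqs))
--             continue
--         if target[t_idx] not in c2i: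
--             continue
--         s_idx = seqs[-1][-1]
--         indices = [idx for idx in c2i[target[t_idx]] if idx > s_idx]
--         if len(indices) > 0:
--             seqs[-1].append(indices[0])
--         else:
--             seqs.append([c2i[target[t_idx]][0]])
--         queue.append((seqs, t_idx+1))
--     if len(result) == 0: return -1
--     else: return min(result)
-- ===== SOURCE B (Python) =====
-- def shortestWay2(source: str, target: str) -> int:
--     count, j = 1, 0
--     for ch in target:
--         k = source.find(ch, j)
--         if k == -1:
--             k = source.find(ch)
--             if k == -1:
--                 return -1
--             count += 1
--         j = k + 1
--     return count
-- ===== Notes on version B (the rewrite author's own statement) =====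
-- stated objective: faster
-- what changed: Replaced the defaultdict-of-index-lists plus single-element BFS queue (which rebuilds a filtered occurrence list for every target character) by a one-pass two-pointer greedy that advances a source pointer with str.find(ch, j).
import Mathlib
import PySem

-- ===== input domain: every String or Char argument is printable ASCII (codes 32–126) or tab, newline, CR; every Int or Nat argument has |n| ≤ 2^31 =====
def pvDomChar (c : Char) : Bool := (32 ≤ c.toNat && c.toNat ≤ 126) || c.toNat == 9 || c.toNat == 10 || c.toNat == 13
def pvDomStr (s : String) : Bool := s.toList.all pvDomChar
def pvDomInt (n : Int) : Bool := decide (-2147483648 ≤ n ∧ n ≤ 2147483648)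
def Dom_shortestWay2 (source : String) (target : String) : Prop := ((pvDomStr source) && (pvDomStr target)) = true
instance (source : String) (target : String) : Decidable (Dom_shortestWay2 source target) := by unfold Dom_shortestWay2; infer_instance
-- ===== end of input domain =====

-- B replaces A's defaultdict-of-index-lists plus single-element BFS queue by a one-pass
-- two-pointer greedy over the target using source.find(ch, j); equal results on every
-- nonempty target (A raises IndexError on target = "", excluded by Pre_).

-- ===== PORT A =====

-- c2i: defaultdict(list); for i in range(len(source)): c2i[source[i]].append(i)
-- (i ranges over range(len(source)), so the ' ' default of getD is never read)
def buildC2i (s : List Char) : PySem.Dict Char (List Nat) :=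
  (List.range s.length).foldl
    (fun d i => d.insert (s.getD i ' ') (d.getD (s.getD i ' ') [] ++ [i]))
    PySem.Dict.empty

-- the while-queue loop of A, transcribed step for step; fuel only makes the
-- recursion structural (the callers below always pass enough fuel, see sim);
-- seqs and seqs[-1] are nonempty by construction, so the defaults of
-- getLastD/headD are never read where Python evaluates seqs[-1][-1] and c2i[...][0]
def aLoop (c2i : PySem.Dict Char (List Nat)) (t : List Char) (n : Nat)
    (fuel : Nat) (queue : List (List (List Nat) × Nat)) (result : List Int) : List Int :=
  match fuel, queue with
  | 0, _ => result
  | _ + 1, [] => result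
  | fuel + 1, (seqs, tIdx) :: rest =>
    if n ≤ tIdx then
      aLoop c2i t n fuel rest (result ++ [(seqs.length : Int)])
    else
      match c2i.get? (t.getD tIdx ' ') with
      | none => aLoop c2i t n fuel rest result
      | some lst =>
        let sIdx := (seqs.getLastD []).getLastD 0
        let indices := lst.filter (fun idx => sIdx < idx)
        let seqs' :=
          if indices.length > 0 then
            seqs.dropLast ++ [seqs.getLastD [] ++ [indices.headD 0]]
          else
            seqs ++ [[lst.headD 0]]
        aLoop c2i t n fuel (rest ++ [(seqs', tIdx + 1)]) result

def shortestWay2 (source : String) (target : String) : Int :=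
  let s := source.toList
  let t := target.toList
  let n := t.length
  let c2i := buildC2i s
  let t0 := t.headD ' '   -- target[0]; Pre_ excludes target = "" (Python raises IndexError)
  if (c2i.get? t0).isNone then -1
  else
    let idx := (c2i.getD t0 []).headD 0
    let result := aLoop c2i t n (n + 1) [([[idx]], 1)] []
    if result.length = 0 then -1
    else ((PySem.List.min? result (fun x => x)).getD 0)

-- ===== PORT B =====

-- the for-loop of Source B over the characters of target, state (count, j)
def bLoop (source : String) (l : List Char) (count : Int) (j : Int) : Int :=
  match l with
  | [] => count
  | ch :: rest =>
    let k := PySem.Str.findFrom source (String.singleton ch) j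
    if k = -1 then
      let k' := PySem.Str.find source (String.singleton ch)
      if k' = -1 then -1
      else bLoop source rest (count + 1) (k' + 1)
    else bLoop source rest count (k + 1)

def shortestWay2_alt (source : String) (target : String) : Int :=
  bLoop source target.toList 1 0

-- ===== PRECONDITION & SPEC =====
-- Pre_ excludes exactly the empty target, on which Python A raises IndexError at target[0].
def Pre_shortestWay2 (source : String) (target : String) : Prop := target ≠ ""
instance (source : String) (target : String) : Decidable (Pre_shortestWay2 source target) := by
  unfold Pre_shortestWay2; infer_instance

def pvWitness_shortestWay2 : String × String := ("abcab", "aabbc")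

def Spec_shortestWay2 (source : String) (target : String) (out : Int) : Prop := out = shortestWay2_alt source target
instance (source : String) (target : String) (out : Int) : Decidable (Spec_shortestWay2 source target out) := by unfold Spec_shortestWay2; infer_instance

-- ===== CLAIM (what is proved, stated in full; the proofs are below) =====
def Claim_equal_shortestWay2 : Prop := ∀ (source : String) (target : String), Dom_shortestWay2 source target → Pre_shortestWay2 source target → Spec_shortestWay2 source target (shortestWay2 source target)

-- ===== LEMMAS AND PROOFS =====

def posns (s : List Char) (ch : Char) : List Nat :=
  (List.range s.length).filter (fun i => s.getD i ' ' == ch)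

theorem mem_posns {s : List Char} {ch : Char} {i : Nat} :
    i ∈ posns s ch ↔ i < s.length ∧ s.getD i ' ' = ch := by
  simp [posns, List.mem_filter, List.mem_range]

theorem posns_sorted (s : List Char) (ch : Char) : (posns s ch).Pairwise (· < ·) :=
  (List.pairwise_lt_range).filter _

theorem lt_length_of_getElem?_eq_some {s : List Char} {ch : Char} {i : Nat}
    (h : s[i]? = some ch) : i < s.length :=
  (List.getElem?_eq_some_iff.1 h).1

theorem mem_posns' {s : List Char} {ch : Char} {i : Nat} :
    i ∈ posns s ch ↔ s[i]? = some ch := by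
  rw [mem_posns, List.getElem?_eq_some_iff]
  constructor
  · rintro ⟨h1, h2⟩
    exact ⟨h1, by rwa [List.getD_eq_getElem _ _ h1] at h2⟩
  · rintro ⟨h1, h2⟩
    exact ⟨h1, by rw [List.getD_eq_getElem _ _ h1]; exact h2⟩

theorem dict_getD_eq (d : PySem.Dict Char (List Nat)) (k : Char) (v : List Nat) :
    d.getD k v = (d.get? k).getD v := by
  simp [PySem.Dict.getD, PySem.Dict.get?]

theorem foldC2i_get? (s : List Char) (ch : Char) (I : List Nat) (d : PySem.Dict Char (List Nat)) :
    (I.foldl (fun d i => d.insert (s.getD i ' ') (d.getD (s.getD i ' ') [] ++ [i])) d).get? ch =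
      match d.get? ch with
      | none => (if I.filter (fun i => s.getD i ' ' == ch) = [] then none
                 else some (I.filter (fun i => s.getD i ' ' == ch)))
      | some v => some (v ++ I.filter (fun i => s.getD i ' ' == ch)) := by
  induction I generalizing d with
  | nil => cases h : d.get? ch <;> simp [h]
  | cons i I ih =>
    rw [List.foldl_cons, ih]
    by_cases hc : s.getD i ' ' = ch
    · have hf : List.filter (fun j => s.getD j ' ' == ch) (i :: I)
          = i :: List.filter (fun j => s.getD j ' ' == ch) I :=
        List.filter_cons_of_pos (by simp only [beq_iff_eq]; exact hc)
      rw [hc, PySem.Dict.get?_insert_self, dict_getD_eq, hf]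
      cases h : d.get? ch <;> simp
    · have hf : List.filter (fun j => s.getD j ' ' == ch) (i :: I)
          = List.filter (fun j => s.getD j ' ' == ch) I :=
        List.filter_cons_of_neg (by simp only [beq_iff_eq]; exact hc)
      rw [PySem.Dict.get?_insert_of_ne _ _ (fun he => hc he.symm), hf]

theorem buildC2i_get? (s : List Char) (ch : Char) :
    (buildC2i s).get? ch = if posns s ch = [] then none else some (posns s ch) := by
  rw [buildC2i, foldC2i_get?, PySem.Dict.get?_empty]
  rfl

theorem head?_eq_of_sorted_min {l : List Nat} (hs : l.Pairwise (· < ·)) {x : Nat}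
    (hx : x ∈ l) (hmin : ∀ y ∈ l, x ≤ y) : l.head? = some x := by
  cases l with
  | nil => cases hx
  | cons a tl =>
    simp only [List.head?_cons, Option.some.injEq]
    rcases List.mem_cons.1 hx with h | h
    · omega
    · exact absurd ((List.pairwise_cons.1 hs).1 x h) (by have := hmin a (by simp); omega)

theorem singleton_prefix_iff_head? (a : Char) (l : List Char) : [a] <+: l ↔ l.head? = some a := by
  cases l with
  | nil => simp
  | cons b tl => simp [List.cons_prefix_cons, eq_comm]

-- [ch] <+: s.drop i ↔ s[i]? = some ch

theorem singleton_prefix_drop (ch : Char) (s : List Char) (i : Nat) :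
    [ch] <+: s.drop i ↔ s[i]? = some ch := by
  rw [singleton_prefix_iff_head?, List.head?_drop]

theorem findFrom_eq_posns (s : List Char) (ch : Char) (j : Nat) (hj : j ≤ s.length) :
    PySem.Chars.findFrom s [ch] (j : Int) none =
      match ((posns s ch).filter (fun i => j ≤ i)).head? with
      | none => -1
      | some i => (i : Int) := by
  by_cases h : PySem.Chars.findFrom s [ch] (j : Int) none = -1
  · rw [h]
    have hempty : (posns s ch).filter (fun i => j ≤ i) = [] := by
      rw [List.filter_eq_nil_iff]
      intro i hi
      simp only [decide_eq_true_eq]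
      intro hji
      have hmem := mem_posns'.1 hi
      have hnot := (PySem.Chars.findFrom_natCast_eq_neg_one_iff s [ch] j hj).1 h
      have : ch ∈ s.drop j := by
        rw [List.mem_iff_getElem?]
        have hilen : i < s.length := lt_length_of_getElem?_eq_some hmem
        exact ⟨i - j, by rw [List.getElem?_drop]; rw [show j + (i - j) = i by omega]; exact hmem⟩
      exact hnot ((List.singleton_infix_iff ch _).2 this)
    rw [hempty]
    rfl
  · have hspec := PySem.Chars.findFrom_natCast_spec s [ch] j hj h
    obtain ⟨hle, hpre, hmin⟩ := hspec
    set r := PySem.Chars.findFrom s [ch] (j : Int) none with hr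
    have hr0 : 0 ≤ r := le_trans (by positivity) hle
    have hmemr : r.toNat ∈ (posns s ch).filter (fun i => j ≤ i) := by
      rw [List.mem_filter]
      refine ⟨mem_posns'.2 ?_, by simp; omega⟩
      rw [← singleton_prefix_drop]; exact hpre
    have hminr : ∀ y ∈ (posns s ch).filter (fun i => j ≤ i), r.toNat ≤ y := by
      intro y hy
      rw [List.mem_filter] at hy
      obtain ⟨hy1, hy2⟩ := hy
      simp only [decide_eq_true_eq] at hy2
      by_contra hlt
      exact hmin y hy2 (by omega) ((singleton_prefix_drop ch s y).2 (mem_posns'.1 hy1))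
    have hsorted : ((posns s ch).filter (fun i => j ≤ i)).Pairwise (· < ·) :=
      (posns_sorted s ch).filter _
    rw [head?_eq_of_sorted_min hsorted hmemr hminr]
    show r = ((r.toNat : Nat) : Int)
    omega

theorem aLoop_nil (c2i : PySem.Dict Char (List Nat)) (t : List Char) (n : Nat) (fuel : Nat) (r : List Int) :
    aLoop c2i t n fuel [] r = r := by cases fuel <;> rw [aLoop]

theorem find_eq_posns (s : List Char) (ch : Char) :
    PySem.Chars.find s [ch] =
      match (posns s ch).head? with
      | none => -1
      | some i => (i : Int) := by
  have h0 := findFrom_eq_posns s ch 0 (Nat.zero_le _)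
  rw [Nat.cast_zero, PySem.Chars.findFrom_zero] at h0
  rw [h0, List.filter_eq_self.2 (by intro a _; simp)]

theorem min?_singleton (v : Int) : PySem.List.min? [v] (fun x => x) = some v := by
  simp [PySem.List.min?]

theorem sim (s t : List Char) (l : List Char) :
    ∀ (fuel : Nat) (tIdx : Nat) (seqs : List (List Nat)) (result : List Int) (j : Nat),
      l.length + 2 ≤ fuel →
      l = t.drop tIdx →
      seqs ≠ [] →
      seqs.getLastD [] ≠ [] →
      (seqs.getLastD []).getLastD 0 + 1 = j →
      j ≤ s.length →
      aLoop (buildC2i s) t t.length fuel [(seqs, tIdx)] result =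
        (if bLoop (String.ofList s) l (seqs.length : Int) (j : Int) = -1 then result
         else result ++ [bLoop (String.ofList s) l (seqs.length : Int) (j : Int)]) := by
  induction l with
  | nil =>
    intro fuel tIdx seqs result j hfuel hdrop hne hlastne hlast hj
    obtain ⟨f, rfl⟩ : ∃ f, fuel = f + 1 := ⟨fuel - 1, by omega⟩
    have hn : t.length ≤ tIdx := by
      have := List.drop_eq_nil_iff.1 hdrop.symm
      omega
    rw [aLoop]
    simp only [hn, if_true]
    rw [aLoop_nil, bLoop]
    rw [if_neg (show ¬((seqs.length : Int)) = -1 by omega)]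
  | cons ch rest ih =>
    intro fuel tIdx seqs result j hfuel hdrop hne hlastne hlast hj
    obtain ⟨f, rfl⟩ : ∃ f, fuel = f + 1 := ⟨fuel - 1, by omega⟩
    have htlt : tIdx < t.length := by
      by_contra hge
      rw [List.drop_eq_nil_iff.2 (by omega)] at hdrop
      simp at hdrop
    have hget : t[tIdx]? = some ch := by
      have := List.head?_drop (l := t) (i := tIdx)
      rw [← hdrop] at this
      exact this.symm
    have hgetD : t.getD tIdx ' ' = ch := by
      rw [List.getD_eq_getElem?_getD, hget]; rfl
    have hrest : rest = t.drop (tIdx + 1) := by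
      have h2 := congrArg List.tail hdrop
      simpa [List.tail_drop] using h2
    rw [aLoop]
    simp only [if_neg (by omega : ¬ t.length ≤ tIdx), hgetD, buildC2i_get?]
    rw [bLoop]
    have hFF := findFrom_eq_posns s ch j hj
    have hstr : (String.ofList s).toList = s := by simp
    simp only [PySem.Str.findFrom_eq, PySem.Str.find_eq, hstr, String.toList_singleton]
    by_cases hp : posns s ch = []
    · rw [hp] at hFF
      simp only [List.filter_nil, List.head?_nil] at hFF
      simp [hp, hFF, find_eq_posns, aLoop_nil]
    · rw [if_neg hp]
      have hfilter : (posns s ch).filter (fun idx => decide ((seqs.getLastD []).getLastD 0 < idx))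
          = (posns s ch).filter (fun i => decide (j ≤ i)) :=
        List.filter_congr (fun i _ => by simp only [decide_eq_decide]; omega)
      obtain ⟨p, ps, hps⟩ := List.exists_cons_of_ne_nil hp
      cases hF : (posns s ch).filter (fun i => decide (j ≤ i)) with
      | nil =>
        -- indices empty: A starts a new subsequence at p; B restarts with find
        simp only [hfilter, hF, List.length_nil, gt_iff_lt, lt_irrefl, if_false]
        rw [hF] at hFF
        simp only [List.head?_nil] at hFF
        rw [hFF, if_pos rfl]
        rw [find_eq_posns, hps]
        simp only [List.head?_cons]
        have hpmem : p ∈ posns s ch := by rw [hps]; simp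
        have hplen : p < s.length := lt_length_of_getElem?_eq_some (mem_posns'.1 hpmem)
        rw [if_neg (show ¬ ((p : Int) = -1) by intro hq; omega)]
        rw [List.nil_append]
        simp only [List.headD_cons]
        rw [ih f (tIdx + 1) (seqs ++ [[p]]) result (p + 1)
          (by simp at hfuel ⊢; omega) hrest (by simp) (by simp) (by simp) (by omega)]
        simp only [List.length_append, List.length_cons, List.length_nil]
        push_cast
        ring_nf
      | cons q qs =>
        simp only [hfilter, hF, List.length_cons, List.headD_cons]
        rw [if_pos (by omega)]
        rw [hF] at hFF
        simp only [List.head?_cons] at hFF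
        rw [hFF]
        have hqmem : q ∈ posns s ch := by
          have : q ∈ (posns s ch).filter (fun i => decide (j ≤ i)) := by rw [hF]; simp
          exact (List.mem_filter.1 this).1
        have hqlen : q < s.length := lt_length_of_getElem?_eq_some (mem_posns'.1 hqmem)
        rw [if_neg (show ¬ ((q : Int) = -1) by simp)]
        rw [List.nil_append]
        rw [ih f (tIdx + 1) (seqs.dropLast ++ [seqs.getLastD [] ++ [q]]) result (q + 1)
          (by simp at hfuel ⊢; omega) hrest (by simp) (by simp) (by simp) (by omega)]
        have hlen : (seqs.dropLast ++ [seqs.getLastD [] ++ [q]]).length = seqs.length := by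
          simp [List.length_dropLast]
          cases seqs with
          | nil => exact absurd rfl hne
          | cons a as => simp
        rw [hlen]
        push_cast
        ring_nf

theorem final (source target : String) (hpre : target ≠ "") :
    shortestWay2 source target = shortestWay2_alt source target := by
  unfold shortestWay2 shortestWay2_alt
  dsimp only
  have hts : target.toList ≠ [] := by simpa using hpre
  obtain ⟨t0, rest, ht⟩ := List.exists_cons_of_ne_nil hts
  have hofs : String.ofList source.toList = source := by simp
  have hhead : target.toList.headD ' ' = t0 := by rw [ht]; rfl
  have hrest : rest = target.toList.drop 1 := by rw [ht]; rfl
  rw [hhead, buildC2i_get?]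
  by_cases hp : posns source.toList t0 = []
  · rw [if_pos (by rw [if_pos hp]; rfl)]
    rw [ht, bLoop]
    have h0 : PySem.Chars.find source.toList [t0] = -1 := by
      rw [find_eq_posns, hp]; rfl
    simp only [PySem.Str.findFrom_eq, PySem.Str.find_eq, String.toList_singleton,
      PySem.Chars.findFrom_zero, h0]
    simp
  · obtain ⟨p, ps, hps⟩ := List.exists_cons_of_ne_nil hp
    rw [if_neg (by rw [if_neg hp]; simp)]
    have hgetD : (buildC2i source.toList).getD t0 [] = p :: ps := by
      rw [dict_getD_eq, buildC2i_get?, if_neg hp, hps]; rfl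
    rw [hgetD]
    simp only [List.headD_cons]
    have hpmem : p ∈ posns source.toList t0 := by rw [hps]; simp
    have hplen : p < source.toList.length := lt_length_of_getElem?_eq_some (mem_posns'.1 hpmem)
    have hsim := sim source.toList target.toList (target.toList.drop 1)
      (target.toList.length + 1) 1 [[p]] [] (p + 1)
      (by rw [ht]; simp) rfl (by simp) (by simp) (by simp) (by omega)
    rw [← hrest] at hsim
    simp only [List.length_cons, List.length_nil] at hsim
    push_cast at hsim
    rw [hsim, hofs]
    -- B side: first step of bLoop
    have hfind : PySem.Chars.find source.toList [t0] = (p : Int) := by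
      rw [find_eq_posns, hps]; rfl
    rw [ht, bLoop]
    simp only [PySem.Str.findFrom_eq, String.toList_singleton,
      PySem.Chars.findFrom_zero, hfind]
    rw [if_neg (show ¬ ((p : Int) = -1) by simp)]
    set v := bLoop source rest (1 : Int) ((p : Int) + 1) with hv
    by_cases hveq : v = -1
    · rw [if_pos hveq, hveq]
      simp
    · rw [if_neg hveq]
      simp only [List.nil_append, List.length_cons, List.length_nil]
      rw [if_neg (by simp)]
      rw [min?_singleton]
      rfl

-- ===== VERDICT (by name: the statement is the Claim_ definition above) =====
theorem shortestWay2_spec : Claim_equal_shortestWay2 := by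
  intro source target _hdom hpre
  unfold Spec_shortestWay2
  exact final source target hpre
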